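-- pv_equiv track=rewrite | github.com/aucontraire/chronovista | src/chronovista/services/tag_normalization.py | select_canonical_form
-- ===== SOURCE A (Python) =====
-- def select_canonical_form(forms: list[tuple[str, int]]) -> str:
--     """
--     Select the canonical form from a list of raw forms and their counts.
--
--     Implements the FR-009 algorithm:
--     1. Filter for title case forms (using ``str.istitle()``)
--     2. If title case forms exist: pick the one with highest occurrence count
--     3. If NO title case forms exist: pick the one with highest occurrence count from ALL forms
--     4. If occurrence counts are tied at any step: use alphabetical ``min()`` as deterministic tiebreaker
--
--     Parameters
--     ----------
--     forms : list[tuple[str, int]]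
--         A list of ``(raw_form, occurrence_count)`` tuples.  Must not be empty.
--
--     Returns
--     -------
--     str
--         The selected canonical form.
--
--     Raises
--     ------
--     ValueError
--         If *forms* is empty.
--
--     Examples
--     --------
--     >>> svc = TagNormalizationService()
--     >>> svc.select_canonical_form([("MEXICO", 203), ("Mexico", 412), ("mexico", 156)])
--     'Mexico'
--
--     >>> svc.select_canonical_form([("Mexico", 200), ("México", 200)])
--     'Mexico'
--
--     >>> svc.select_canonical_form([("MEXICO", 500), ("mexico", 300)])
--     'MEXICO'
--     """
--     if not forms:
--         raise ValueError("Cannot select canonical form from empty list")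
--
--     # Single-element case
--     if len(forms) == 1:
--         return forms[0][0]
--
--     # Step 1: Filter for title case forms
--     title_case_forms = [(form, count) for form, count in forms if form.istitle()]
--
--     # Step 2: Determine the candidate pool
--     if title_case_forms:
--         candidates = title_case_forms
--     else:
--         candidates = forms
--
--     # Step 3: Find the maximum occurrence count
--     max_count = max(count for _, count in candidates)
--
--     # Step 4: Get all forms with the maximum count
--     max_forms = [form for form, count in candidates if count == max_count]
--
--     # Step 5: Use alphabetical min as tiebreaker
--     return min(max_forms)
-- ===== SOURCE B (Python) =====
-- def select_canonical_form(forms: list[tuple[str, int]]) -> str: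
--     if not forms:
--         raise ValueError("Cannot select canonical form from empty list")
--     pool = [fc for fc in forms if fc[0].istitle()] or forms
--     best = pool[0]
--     for fc in pool[1:]:
--         if fc[1] > best[1] or (fc[1] == best[1] and fc[0] < best[0]):
--             best = fc
--     return best[0]
-- ===== Notes on version B (the rewrite author's own statement) =====
-- stated objective: simpler
-- what changed: Replaces A's three passes over the candidate pool (max of counts, filter to tied maxima, alphabetical min) and its len==1 shortcut with one single-pass reduction that keeps the best element under (count descending, name ascending).
import Mathlib
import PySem

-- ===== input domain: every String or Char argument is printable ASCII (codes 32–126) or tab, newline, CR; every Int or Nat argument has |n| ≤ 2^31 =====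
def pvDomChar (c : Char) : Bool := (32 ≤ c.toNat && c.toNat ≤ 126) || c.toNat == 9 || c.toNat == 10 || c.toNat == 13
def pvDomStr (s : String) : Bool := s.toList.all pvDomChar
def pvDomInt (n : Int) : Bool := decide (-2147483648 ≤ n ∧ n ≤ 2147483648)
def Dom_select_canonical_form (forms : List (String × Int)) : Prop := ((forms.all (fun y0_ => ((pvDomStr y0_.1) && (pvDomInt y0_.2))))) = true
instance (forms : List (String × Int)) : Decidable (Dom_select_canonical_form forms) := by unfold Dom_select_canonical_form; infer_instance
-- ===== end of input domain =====

-- B replaces A's three passes (max count, filter ties, alphabetical min) by one reduction; objective: simpler.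

-- str.istitle(), hand-ported (exact on ASCII: cased characters are exactly the letters);
-- state = (previous char cased, some cased char seen, no violation yet)
def pyIstitle (s : String) : Bool :=
  let st := s.toList.foldl (fun (st : Bool × Bool × Bool) c =>
    let (prevCased, found, ok) := st
    if PySem.Chars.isupper c then (true, true, ok && !prevCased)
    else if PySem.Chars.islower c then (true, true, ok && prevCased)
    else (false, found, ok)) (false, false, true)
  st.2.1 && st.2.2

-- ===== PORT A =====
def select_canonical_form (forms : List (String × Int)) : String :=
  match forms with
  | [] => ""    -- A raises ValueError here; excluded by Pre_
  | f :: rest =>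
    if rest = [] then f.1
    else
      let title_case_forms := forms.filter (fun fc => pyIstitle fc.1)
      let candidates := if title_case_forms ≠ [] then title_case_forms else forms
      let max_count := (PySem.List.max? (candidates.map (fun fc => fc.2)) (fun x => x)).getD 0
      let max_forms := (candidates.filter (fun fc => fc.2 = max_count)).map (fun fc => fc.1)
      (PySem.List.min? max_forms (fun x => x)).getD ""

-- ===== PORT B =====
def pyBetter (best fc : String × Int) : String × Int :=
  if fc.2 > best.2 ∨ (fc.2 = best.2 ∧ fc.1 < best.1) then fc else best

def select_canonical_form_alt (forms : List (String × Int)) : String :=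
  match forms with
  | [] => ""    -- B raises ValueError here; excluded by Pre_
  | _ :: _ =>
    let pool := forms.filter (fun fc => pyIstitle fc.1)
    let pool := if pool = [] then forms else pool
    match pool with
    | [] => ""  -- unreachable: pool is nonempty when forms is
    | b :: rest => (rest.foldl pyBetter b).1

-- ===== PRECONDITION & SPEC =====
-- A (and B) raise ValueError on the empty list
def Pre_select_canonical_form (forms : List (String × Int)) : Prop := forms ≠ []
instance (forms : List (String × Int)) : Decidable (Pre_select_canonical_form forms) := by unfold Pre_select_canonical_form; infer_instance
def pvWitness_select_canonical_form : (List (String × Int)) := [("Mexico", 2), ("mexico", 3)]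

def Spec_select_canonical_form (forms : List (String × Int)) (out : String) : Prop := out = select_canonical_form_alt forms
instance (forms : List (String × Int)) (out : String) : Decidable (Spec_select_canonical_form forms out) := by unfold Spec_select_canonical_form; infer_instance

-- ===== CLAIM (what is proved, stated in full; the proofs are below) =====
def Claim_equal_select_canonical_form : Prop := ∀ (forms : List (String × Int)), Dom_select_canonical_form forms → Pre_select_canonical_form forms → Spec_select_canonical_form forms (select_canonical_form forms)

-- ===== LEMMAS AND PROOFS =====

-- the "best" element: maximal count, and minimal name among those of maximal count
def PvGood (l : List (String × Int)) (m : String × Int) : Prop :=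
  m ∈ l ∧ (∀ x ∈ l, x.2 ≤ m.2) ∧ (∀ x ∈ l, x.2 = m.2 → m.1 ≤ x.1)

lemma pvGood_step (b x : String × Int) (t : List (String × Int)) (m : String × Int)
    (h : PvGood (pyBetter b x :: t) m) : PvGood (b :: x :: t) m := by
  obtain ⟨hmem, hmax, hmin⟩ := h
  unfold pyBetter at *
  simp only [List.mem_cons] at hmem
  split_ifs at hmem hmax hmin with hc
  · -- x was kept, b dropped
    refine ⟨?_, ?_, ?_⟩
    · rcases hmem with h | h
      · exact List.mem_cons_of_mem _ (h ▸ List.mem_cons_self)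
      · exact List.mem_cons_of_mem _ (List.mem_cons_of_mem _ h)
    · intro y hy
      simp only [List.mem_cons] at hy
      rcases hy with h | h | h
      · have hx2 : x.2 ≤ m.2 := hmax x List.mem_cons_self
        rcases hc with hgt | ⟨heq, _⟩
        · subst h; omega
        · subst h; omega
      · subst h; exact hmax _ List.mem_cons_self
      · exact hmax y (List.mem_cons_of_mem _ h)
    · intro y hy hy2
      have hx2 : x.2 ≤ m.2 := hmax x List.mem_cons_self
      simp only [List.mem_cons] at hy
      rcases hy with h | h | h
      · subst h
        rcases hc with hgt | ⟨heq, hlt⟩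
        · omega
        · have : m.1 ≤ x.1 := hmin x List.mem_cons_self (by omega)
          exact le_trans this (le_of_lt hlt)
      · subst h; exact hmin _ List.mem_cons_self hy2
      · exact hmin y (List.mem_cons_of_mem _ h) hy2
  · -- b kept, x dropped
    push Not at hc
    refine ⟨?_, ?_, ?_⟩
    · rcases hmem with h | h
      · exact h ▸ List.mem_cons_self
      · exact List.mem_cons_of_mem _ (List.mem_cons_of_mem _ h)
    · intro y hy
      simp only [List.mem_cons] at hy
      have hb2 : b.2 ≤ m.2 := hmax b List.mem_cons_self
      rcases hy with h | h | h
      · exact h ▸ hb2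
      · subst h; omega
      · exact hmax y (List.mem_cons_of_mem _ h)
    · intro y hy hy2
      simp only [List.mem_cons] at hy
      have hb2 : b.2 ≤ m.2 := hmax b List.mem_cons_self
      rcases hy with h | h | h
      · subst h; exact hmin _ List.mem_cons_self hy2
      · subst h
        have hxb : y.2 = b.2 := by omega
        have hb1 : b.1 ≤ y.1 := le_of_not_gt (hc.2 hxb)
        have : m.1 ≤ b.1 := hmin b List.mem_cons_self (by omega)
        exact le_trans this hb1
      · exact hmin y (List.mem_cons_of_mem _ h) hy2

lemma pvGood_foldl : ∀ (rest : List (String × Int)) (b : String × Int),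
    PvGood (b :: rest) (rest.foldl pyBetter b) := by
  intro rest
  induction rest with
  | nil =>
    intro b
    exact ⟨List.mem_cons_self, by intro x hx; simp at hx; simp [hx],
      by intro x hx _; simp at hx; simp [hx]⟩
  | cons x t ih =>
    intro b
    have := ih (pyBetter b x)
    simpa [List.foldl_cons] using pvGood_step b x t _ this

-- A's three-pass computation yields exactly the name of any PvGood element
lemma pv_sel_eq (c : List (String × Int)) (m : String × Int) (hm : PvGood c m) :
    (PySem.List.min? ((c.filter (fun fc => fc.2 =
        (PySem.List.max? (c.map (fun fc => fc.2)) (fun x => x)).getD 0)).map (fun fc => fc.1))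
      (fun x => x)).getD "" = m.1 := by
  obtain ⟨hmem, hmax, hmin⟩ := hm
  have hne : c ≠ [] := by intro h; subst h; simp at hmem
  -- max? is some M, and M = m.2
  obtain ⟨M, hM⟩ : ∃ M, PySem.List.max? (c.map (fun fc => fc.2)) (fun x => x) = some M := by
    cases h : PySem.List.max? (c.map (fun fc => fc.2)) (fun x => x) with
    | none => exact absurd (by simpa using ((PySem.List.max?_eq_none_iff _ _).mp h)) hne
    | some M => exact ⟨M, rfl⟩
  have hMmem := PySem.List.max?_mem hM
  obtain ⟨x, hx, hxM⟩ := List.mem_map.mp hMmem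
  have hMle : M ≤ m.2 := hxM ▸ hmax x hx
  have hgeM : m.2 ≤ M := by
    have := PySem.List.max?_isMax hM m.2 (List.mem_map.mpr ⟨m, hmem, rfl⟩)
    simpa using this
  have hMeq : M = m.2 := le_antisymm hMle hgeM
  rw [hM]
  simp only [Option.getD_some]
  show (PySem.List.min? ((c.filter (fun fc => fc.2 = M)).map (fun fc => fc.1)) (fun x => x)).getD "" = m.1
  -- m's name is in the filtered-name list
  have hmf : m.1 ∈ (c.filter (fun fc => fc.2 = M)).map (fun fc => fc.1) :=
    List.mem_map.mpr ⟨m, List.mem_filter.mpr ⟨hmem, by simp [hMeq]⟩, rfl⟩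
  have hne2 : (c.filter (fun fc => fc.2 = M)).map (fun fc => fc.1) ≠ [] := by
    intro h; rw [h] at hmf; simp at hmf
  obtain ⟨n, hn⟩ : ∃ n, PySem.List.min? ((c.filter (fun fc => fc.2 = M)).map (fun fc => fc.1))
      (fun x => x) = some n := by
    cases h : PySem.List.min? ((c.filter (fun fc => fc.2 = M)).map (fun fc => fc.1)) (fun x => x) with
    | none => exact absurd ((PySem.List.min?_eq_none_iff _ _).mp h) hne2
    | some n => exact ⟨n, rfl⟩
  have hnmem := PySem.List.min?_mem hn
  obtain ⟨y, hy, hyn⟩ := List.mem_map.mp hnmem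
  have hy' := List.mem_filter.mp hy
  have hmn : m.1 ≤ n := hyn ▸ hmin y hy'.1 (by have := hy'.2; simp at this; omega)
  have hnm : n ≤ m.1 := by
    have := PySem.List.min?_isMin hn m.1 hmf
    simpa using this
  simp only [hn, Option.getD_some]
  exact le_antisymm hnm hmn

-- ===== VERDICT (by name: the statement is the Claim_ definition above) =====
theorem select_canonical_form_spec : Claim_equal_select_canonical_form := by
  intro forms _ hpre
  unfold Spec_select_canonical_form
  match forms with
  | [] => exact absurd rfl hpre
  | f :: rest =>
    by_cases hr : rest = []
    · subst hr
      simp only [select_canonical_form, select_canonical_form_alt]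
      by_cases ht : pyIstitle f.1 <;> simp [List.filter, ht]
    · by_cases h : (f :: rest).filter (fun fc => pyIstitle fc.1) = []
      · simp only [select_canonical_form, select_canonical_form_alt, hr, h]
        simp only [ne_eq, not_true_eq_false, if_false, if_true]
        exact pv_sel_eq _ _ (pvGood_foldl rest f)
      · obtain ⟨b, rest', hbr⟩ : ∃ b rest',
            (f :: rest).filter (fun fc => pyIstitle fc.1) = b :: rest' := by
          cases hc : (f :: rest).filter (fun fc => pyIstitle fc.1) with
          | nil => exact absurd hc h
          | cons b r => exact ⟨b, r, rfl⟩
        simp only [select_canonical_form, select_canonical_form_alt, hbr, if_neg hr]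
        simp only [ne_eq, reduceCtorEq, not_false_eq_true, if_true]
        exact pv_sel_eq _ _ (pvGood_foldl rest' b)
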